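-- pv_equiv track=rewrite | github.com/Aliuakbar/ProjectEuler | problem659.py | new_helper
-- ===== SOURCE A (Python) =====
-- def modified_prime_gen():
--     yield (1, 3)
--     y = 3
--     i = 2
--     s = 1
--     while True:
--         y += 2
--         i = 2
--         prime = True
--         while i * i <= y:
--             if y % i == 0:
--                 prime = False
--                 s += 1
--                 break
--             i += 1
--         if prime:
--             yield (s, y)
--             s = 1
--
-- def new_helper(k):
--     i = 3
--     x = 1 + k ** 2
--     gen = modified_prime_gen()
--     s, p = next(gen)
--     while True:
--         if x % p == 0:
--             return p
--         s, p = next(gen)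
--         for _ in range(s):
--             x += i
--             i += 2
-- ===== SOURCE B (Python) =====
-- def new_helper(k):
--     # A returns the least prime p >= 3 with ((p-1)/2)^2 + k^2 divisible by p,
--     # which (p odd) is exactly the least prime factor of n = 4*k*k + 1.
--     # B computes it by direct trial division of n by odd candidates.
--     n = 4 * k * k + 1
--     d = 3
--     while d * d <= n:
--         if n % d == 0:
--             return d
--         d += 2
--     return n
-- ===== Notes on version B (the rewrite author's own statement) =====
-- stated objective: simpler
-- what changed: A scans the full prime sequence (each prime found by its own trial-division primality test) while maintaining x = ((p-1)/2)^2 + k^2 incrementally and returns the first prime dividing x; B observes that p | x iff p | 4k^2+1 and directly trial-divides n = 4k^2+1 by odd candidates, returning the least prime factor of n; Pre_ excludes only k = 0, where 4k^2+1 = 1 has no prime factor and A loops forever without returning.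
-- outside the precondition, e.g. on new_helper(0): A does not finish within the time limit, B returns 1
import Mathlib
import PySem

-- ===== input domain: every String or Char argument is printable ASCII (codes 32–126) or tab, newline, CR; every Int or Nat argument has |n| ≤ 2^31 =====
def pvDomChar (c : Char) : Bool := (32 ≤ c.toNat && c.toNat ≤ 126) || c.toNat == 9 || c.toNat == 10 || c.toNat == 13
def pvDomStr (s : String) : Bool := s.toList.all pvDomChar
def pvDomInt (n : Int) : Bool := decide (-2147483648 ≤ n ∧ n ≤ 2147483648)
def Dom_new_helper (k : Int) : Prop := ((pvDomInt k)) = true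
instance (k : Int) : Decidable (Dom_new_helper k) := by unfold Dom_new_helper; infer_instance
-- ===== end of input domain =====

-- B replaces A's prime-stream scan (with incremental x = ((p-1)/2)^2 + k^2 bookkeeping) by
-- direct trial division of n = 4k^2+1, the number A's divisibility test is secretly about: simpler.


-- ===== PORT A =====
-- inner `while i * i <= y` primality loop of modified_prime_gen (fuel only makes it total)
def pvAIsPrime (y i : Int) (fuel : Nat) : Bool :=
  match fuel with
  | 0 => false
  | f + 1 =>
      if i * i ≤ y then
        if y % i = 0 then false else pvAIsPrime y (i + 1) f
      else true

-- one resumption of the generator from state (y, s): scan odd y += 2 until prime, yield (s, y)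
-- (fuel only makes it total); returns (yielded s, yielded p, new generator y)
def pvAGenNext (y s : Int) (fuel : Nat) : Int × Int × Int :=
  match fuel with
  | 0 => (s, y, y)
  | f + 1 =>
      -- y' := y + 2 inlined
      if pvAIsPrime (y + 2) 2 (y + 2).toNat then (s, y + 2, y + 2)
      else pvAGenNext (y + 2) (s + 1) f

-- `for _ in range(s): x += i; i += 2`
def pvAStep (x i : Int) (s : Nat) : Int × Int :=
  match s with
  | 0 => (x, i)
  | t + 1 => pvAStep (x + i) (i + 2) t

-- main `while True` loop; generator state after a yield is (y = p, s = 1)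
def pvAMain (x i p y : Int) (genfuel : Nat) (fuel : Nat) : Int :=
  match fuel with
  | 0 => 0
  | f + 1 =>
      if x % p = 0 then p
      else
        let (s, p', y') := pvAGenNext y 1 genfuel
        let (x', i') := pvAStep x i s.toNat
        pvAMain x' i' p' y' genfuel f

def new_helper (k : Int) : Int :=
  let x := 1 + k ^ 2
  -- gen's first yield is (1, 3); generator state afterwards: y = 3, s = 1
  pvAMain x 3 3 3 ((4 * k * k + 1).toNat + 1) ((4 * k * k + 1).toNat + 1)

-- ===== PORT B =====
-- `while d * d <= n` trial-division loop of Source B (fuel only makes it total)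
def pvBLoop (n d : Int) (fuel : Nat) : Int :=
  match fuel with
  | 0 => 0
  | f + 1 =>
      if d * d ≤ n then
        if n % d = 0 then d else pvBLoop n (d + 2) f
      else n

def new_helper_alt (k : Int) : Int :=
  let n := 4 * k * k + 1
  pvBLoop n 3 (n.toNat + 1)

-- ===== PRECONDITION & SPEC =====
-- Pre_ excludes only k = 0: there 4k^2+1 = 1 has no prime factor and A loops forever (never returns).
def Pre_new_helper (k : Int) : Prop := k ≠ 0
instance (k : Int) : Decidable (Pre_new_helper k) := by unfold Pre_new_helper; infer_instance
def pvWitness_new_helper : Int := (1)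
def Spec_new_helper (k : Int) (out : Int) : Prop := out = new_helper_alt k
instance (k : Int) (out : Int) : Decidable (Spec_new_helper k out) := by unfold Spec_new_helper; infer_instance

-- ===== CLAIM (what is proved, stated in full; the proofs are below) =====
def Claim_equal_new_helper : Prop := ∀ (k : Int), Dom_new_helper k → Pre_new_helper k → Spec_new_helper k (new_helper k)

-- ===== LEMMAS AND PROOFS =====

theorem pvAIsPrime_spec (y : Int) :
    ∀ (fuel : Nat) (i : Int), 2 ≤ i → y < i + fuel → 1 ≤ (fuel : Int) →
      (pvAIsPrime y i fuel = true ↔ ∀ m : Int, i ≤ m → m * m ≤ y → ¬ (m ∣ y)) := by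
  intro fuel
  induction fuel with
  | zero => intro i _ _ h; norm_num at h
  | succ f ih =>
      intro i hi hlt _
      unfold pvAIsPrime
      by_cases hcond : i * i ≤ y
      · simp only [hcond, if_true]
        by_cases hmod : y % i = 0
        · rw [if_pos hmod]
          constructor
          · intro h; exact absurd h (by simp)
          · intro h
            exact absurd ((EuclideanDomain.mod_eq_zero).mp hmod) (h i le_rfl hcond)
        · have hidvd : ¬ (i ∣ y) := fun hd => hmod ((EuclideanDomain.mod_eq_zero).mpr hd)
          rw [if_neg hmod]
          have hf1 : 1 ≤ (f : Int) := by
            have : i + 2 ≤ y := by nlinarith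
            push_cast at hlt; omega
          have hlt' : y < (i + 1) + f := by push_cast at hlt ⊢; omega
          rw [ih (i + 1) (by omega) hlt' hf1]
          constructor
          · intro h m hm hmy
            rcases eq_or_lt_of_le hm with rfl | hlt2
            · exact hidvd
            · exact h m (by omega) hmy
          · intro h m hm hmy; exact h m (by omega) hmy
      · rw [if_neg hcond]
        constructor
        · intro _ m hm hmy _
          have : i * i ≤ m * m := by nlinarith
          exact hcond (le_trans this hmy)
        · intro _; rfl

-- for 2 ≤ n, the trial-division criterion is primality
theorem prime_iff_no_small_dvd (n : ℕ) (hn : 2 ≤ n) :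
    n.Prime ↔ ∀ m : ℕ, 2 ≤ m → m * m ≤ n → ¬ m ∣ n := by
  constructor
  · intro hp m hm hmn hdvd
    rcases (Nat.Prime.eq_one_or_self_of_dvd hp m hdvd) with h1 | h1
    · omega
    · subst h1; nlinarith
  · intro h
    by_contra hnp
    have hq := Nat.minFac_prime (by omega : n ≠ 1)
    have hsq := Nat.minFac_sq_le_self (by omega : 0 < n) hnp
    exact h n.minFac hq.two_le (by nlinarith [sq_nonneg n.minFac]) (Nat.minFac_dvd n)

theorem pvAIsPrime_prime (y : ℕ) (hy : 2 ≤ y) :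
    pvAIsPrime (y : Int) 2 y = decide (Nat.Prime y) := by
  have hspec := pvAIsPrime_spec (y : Int) y 2 (by norm_num)
    (by omega) (by omega)
  by_cases hp : Nat.Prime y
  · rw [decide_eq_true (by exact_mod_cast hp)]
    apply hspec.mpr
    intro m hm hmy hdvd
    have hm0 : 0 ≤ m := by omega
    obtain ⟨mn, rfl⟩ := Int.eq_ofNat_of_zero_le hm0
    exact (prime_iff_no_small_dvd y hy).mp hp mn (by exact_mod_cast hm)
      (by exact_mod_cast hmy) (by exact_mod_cast hdvd)
  · rw [decide_eq_false (by exact_mod_cast hp)]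
    by_contra hne
    have hb : pvAIsPrime (y : Int) 2 y = true := by
      cases h : pvAIsPrime (y : Int) 2 y
      · exact absurd h hne
      · rfl
    have hall := hspec.mp hb
    apply hp
    rw [prime_iff_no_small_dvd y hy]
    intro m hm hmy hdvd
    exact hall (m : Int) (by exact_mod_cast hm) (by exact_mod_cast hmy)
      (by exact_mod_cast hdvd)

theorem pvAGenNext_spec :
    ∀ (fuel : Nat) (yn g : ℕ) (s : Int), 3 ≤ yn → Odd yn → 1 ≤ g → g ≤ fuel →
      (yn + 2 * g).Prime → (∀ j, 1 ≤ j → j < g → ¬ (yn + 2 * j).Prime) →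
      pvAGenNext (yn : Int) s fuel = (s + g - 1, ((yn + 2 * g : ℕ) : Int), ((yn + 2 * g : ℕ) : Int)) := by
  intro fuel
  induction fuel with
  | zero => intro yn g s _ _ hg hgf _ _; omega
  | succ f ih =>
      intro yn g s hyn hodd hg hgf hprime hcomp
      unfold pvAGenNext
      have hy2 : (yn : Int) + 2 = ((yn + 2 : ℕ) : Int) := by push_cast; ring
      rw [hy2, Int.toNat_natCast, pvAIsPrime_prime (yn + 2) (by omega)]
      rcases eq_or_lt_of_le hg with hg1 | hg2
      · cases hg1
        have hpr : Nat.Prime (yn + 2) := by simpa using hprime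
        rw [decide_eq_true hpr]
        norm_num
      · have hnpr : ¬ Nat.Prime (yn + 2) := by
          have := hcomp 1 le_rfl (by omega)
          simpa using this
        rw [decide_eq_false hnpr]
        have heq : yn + 2 + 2 * (g - 1) = yn + 2 * g := by omega
        have := ih (yn + 2) (g - 1) (s + 1) (by omega)
          (by rw [Nat.odd_iff] at hodd ⊢; omega) (by omega) (by omega)
          (by rw [heq]; exact hprime)
          (by intro j hj1 hj2
              have := hcomp (j + 1) (by omega) (by omega)
              have harg : yn + 2 + 2 * j = yn + 2 * (j + 1) := by omega
              rw [harg]; exact this)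
        rw [this, heq]
        have hs : s + 1 + ((g - 1 : ℕ) : Int) - 1 = s + (g : Int) - 1 := by omega
        rw [hs]
        simp

theorem pvAStep_spec : ∀ (s : Nat) (x i : Int),
    pvAStep x i s = (x + s * i + s * (s - 1), i + 2 * s) := by
  intro s
  induction s with
  | zero => intro x i; simp [pvAStep]
  | succ t ih =>
      intro x i
      show pvAStep (x + i) (i + 2) t = _
      rw [ih]
      simp only [Prod.mk.injEq]
      constructor <;> push_cast <;> ring

-- p odd, p = 2m+1: p divides m^2 + k^2 iff p divides 4k^2+1
theorem key_dvd (k : Int) (m p : ℕ) (hp : p.Prime) (hodd : p = 2 * m + 1) (hm : 1 ≤ m) :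
    ((p : Int) ∣ (m : Int) ^ 2 + k ^ 2 ↔ p ∣ (4 * k * k + 1).toNat) := by
  have hn0 : (0 : Int) ≤ 4 * k * k + 1 := by nlinarith [mul_self_nonneg k]
  have hcast : (((4 * k * k + 1).toNat : ℕ) : Int) = 4 * k * k + 1 := Int.toNat_of_nonneg hn0
  rw [← Int.natCast_dvd_natCast (m := p), hcast]
  have hdiff : (p : Int) ∣ 4 * ((m : Int) ^ 2 + k ^ 2) - (4 * k * k + 1) := by
    refine ⟨2 * (m : Int) - 1, ?_⟩
    have hpc : (p : Int) = 2 * (m : Int) + 1 := by exact_mod_cast congrArg (Nat.cast (R := Int)) hodd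
    rw [hpc]; ring
  have hpprime : Prime (p : Int) := Nat.prime_iff_prime_int.mp hp
  have hp4 : ¬ (p : Int) ∣ 4 := by
    intro h4
    have : p ∣ 4 := by
      have := Int.natCast_dvd_natCast.mp (by exact_mod_cast h4)
      exact this
    have hle : p ≤ 4 := Nat.le_of_dvd (by norm_num) this
    interval_cases p <;> omega
  constructor
  · intro hx
    have h4x : (p : Int) ∣ 4 * ((m : Int) ^ 2 + k ^ 2) := Dvd.dvd.mul_left hx 4
    have := dvd_sub h4x hdiff
    simpa using this
  · intro hn
    have h4x : (p : Int) ∣ 4 * ((m : Int) ^ 2 + k ^ 2) := by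
      have := dvd_add hdiff hn
      simpa using this
    rcases hpprime.dvd_mul.mp h4x with h | h
    · exact absurd h hp4
    · exact h

theorem pvN_facts (k : Int) (hk : k ≠ 0) :
    5 ≤ (4 * k * k + 1).toNat ∧ (4 * k * k + 1).toNat % 2 = 1 ∧
      (((4 * k * k + 1).toNat : ℕ) : Int) = 4 * k * k + 1 := by
  have h1 : 1 ≤ k * k := by rcases lt_or_gt_of_ne hk with h | h <;> nlinarith
  have h2 : 4 * k * k = 4 * (k * k) := by ring
  omega

theorem pvQ_facts (N : ℕ) (h5 : 5 ≤ N) (hodd : N % 2 = 1) :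
    N.minFac.Prime ∧ N.minFac % 2 = 1 ∧ 3 ≤ N.minFac ∧ N.minFac ≤ N ∧ N.minFac ∣ N := by
  have hq := Nat.minFac_prime (by omega : N ≠ 1)
  have hqd := Nat.minFac_dvd N
  have hqodd : N.minFac % 2 = 1 := by
    rcases hq.eq_two_or_odd' with h2 | ho
    · exfalso; rw [h2] at hqd; obtain ⟨c, hc⟩ := hqd; omega
    · exact Nat.odd_iff.mp ho
  exact ⟨hq, hqodd, by have := hq.two_le; omega, Nat.minFac_le (by omega), hqd⟩

theorem pvAMain_spec (k : Int) (hk : k ≠ 0) :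
    ∀ (fuel : Nat) (m p : ℕ), p = 2 * m + 1 → p.Prime → p ≤ (4 * k * k + 1).toNat.minFac →
      ((4 * k * k + 1).toNat.minFac : Int) < (p : Int) + 2 * fuel →
      pvAMain ((m : Int) ^ 2 + k ^ 2) (p : Int) (p : Int) (p : Int) ((4 * k * k + 1).toNat + 1) fuel
        = ((4 * k * k + 1).toNat.minFac : Int) := by
  obtain ⟨hN5, hNodd, hNcast⟩ := pvN_facts k hk
  obtain ⟨hq, hqodd, hq3, hqN, hqd⟩ := pvQ_facts _ hN5 hNodd
  intro fuel
  induction fuel with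
  | zero => intro m p hp2m hpp hpq hfuel; exfalso; omega
  | succ f ih =>
      intro m p hp2m hpp hpq hfuel
      have hm1 : 1 ≤ m := by have := hpp.two_le; omega
      unfold pvAMain
      have hxdvd := key_dvd k m p hpp hp2m hm1
      by_cases hdvd : p ∣ (4 * k * k + 1).toNat
      · have hqp : (4 * k * k + 1).toNat.minFac = p :=
          le_antisymm (Nat.minFac_le_of_dvd hpp.two_le hdvd) hpq
        have hmod : ((m : Int) ^ 2 + k ^ 2) % (p : Int) = 0 :=
          (EuclideanDomain.mod_eq_zero).mpr (hxdvd.mpr hdvd)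
        rw [if_pos hmod, hqp]
      · have hmod : ¬ ((m : Int) ^ 2 + k ^ 2) % (p : Int) = 0 := fun h =>
          hdvd (hxdvd.mp ((EuclideanDomain.mod_eq_zero).mp h))
        rw [if_neg hmod]
        have hplt : p < (4 * k * k + 1).toNat.minFac := by
          rcases Nat.lt_or_ge p (4 * k * k + 1).toNat.minFac with h | h
          · exact h
          · exfalso; have : p = (4 * k * k + 1).toNat.minFac := by omega
            rw [this] at hdvd; exact hdvd hqd
        have H : ∃ r, p < r ∧ r.Prime := ⟨(4 * k * k + 1).toNat.minFac, hplt, hq⟩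
        obtain ⟨hpp', hp'prime⟩ := Nat.find_spec H
        have hp'q : Nat.find H ≤ (4 * k * k + 1).toNat.minFac := Nat.find_min' H ⟨hplt, hq⟩
        have hp'odd : Nat.find H % 2 = 1 := by
          rcases hp'prime.eq_two_or_odd' with h2 | ho
          · exfalso; have := hpp.two_le; omega
          · exact Nat.odd_iff.mp ho
        have hpodd : p % 2 = 1 := by omega
        have hgex : Nat.find H = p + 2 * ((Nat.find H - p) / 2) := by omega
        have hg1 : 1 ≤ (Nat.find H - p) / 2 := by omega
        have hcomp : ∀ j, 1 ≤ j → j < (Nat.find H - p) / 2 → ¬ (p + 2 * j).Prime := by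
          intro j hj1 hj2 hpr
          exact Nat.find_min H (show p + 2 * j < Nat.find H by omega) ⟨by omega, hpr⟩
        have hgen := pvAGenNext_spec ((4 * k * k + 1).toNat + 1) p ((Nat.find H - p) / 2) 1
          (by omega) (Nat.odd_iff.mpr hpodd) hg1 (by omega)
          (by rw [← hgex]; exact hp'prime) hcomp
        have hs : (1 : Int) + ((Nat.find H - p) / 2 : ℕ) - 1 = (((Nat.find H - p) / 2 : ℕ) : Int) := by
          ring
        rw [hgen, hs]
        dsimp only
        rw [Int.toNat_natCast, pvAStep_spec]
        dsimp only
        have hpc : (p : Int) = 2 * (m : Int) + 1 := by exact_mod_cast congrArg (Nat.cast (R := Int)) hp2m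
        have hx : (m : Int) ^ 2 + k ^ 2 + (((Nat.find H - p) / 2 : ℕ) : Int) * (p : Int)
            + (((Nat.find H - p) / 2 : ℕ) : Int) * ((((Nat.find H - p) / 2 : ℕ) : Int) - 1)
            = ((m + (Nat.find H - p) / 2 : ℕ) : Int) ^ 2 + k ^ 2 := by
          push_cast; rw [hpc]; ring
        have hi : (p : Int) + 2 * (((Nat.find H - p) / 2 : ℕ) : Int)
            = ((p + 2 * ((Nat.find H - p) / 2) : ℕ) : Int) := by push_cast; ring
        rw [hx, hi]
        have hcast2 : ((p + 2 * ((Nat.find H - p) / 2) : ℕ) : Int)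
            = ((2 * (m + (Nat.find H - p) / 2) + 1 : ℕ) : Int) := by push_cast; omega
        rw [hcast2]
        exact ih (m + (Nat.find H - p) / 2) (2 * (m + (Nat.find H - p) / 2) + 1) rfl
          (by have : 2 * (m + (Nat.find H - p) / 2) + 1 = Nat.find H := by omega
              rw [this]; exact hp'prime)
          (by omega) (by omega)

theorem pvBLoop_spec (N : ℕ) (hN : 5 ≤ N) (hodd : ¬ 2 ∣ N) :
    ∀ (fuel : Nat) (d : ℕ), Odd d → 3 ≤ d → d ≤ N.minFac → (N.minFac : Int) < (d : Int) + 2 * fuel →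
      pvBLoop (N : Int) (d : Int) fuel = (N.minFac : Int) := by
  have hq := Nat.minFac_prime (by omega : N ≠ 1)
  have hqd := Nat.minFac_dvd N
  have hqodd : N.minFac % 2 = 1 := by
    rcases hq.eq_two_or_odd' with h2 | hodd2
    · exact absurd (h2 ▸ hqd) hodd
    · exact Nat.odd_iff.mp hodd2
  intro fuel
  induction fuel with
  | zero =>
      intro d _ _ hdq hfuel
      have : (d : Int) ≤ N.minFac := by exact_mod_cast hdq
      omega
  | succ f ih =>
      intro d hodd3 hd3 hdq hfuel
      unfold pvBLoop
      by_cases hdd : (d : Int) * (d : Int) ≤ (N : Int)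
      · rw [if_pos hdd]
        by_cases hmod : (N : Int) % (d : Int) = 0
        · rw [if_pos hmod]
          have hdvd : d ∣ N := by
            exact_mod_cast (EuclideanDomain.mod_eq_zero).mp hmod
          have : N.minFac ≤ d := Nat.minFac_le_of_dvd (by omega) hdvd
          have : N.minFac = d := by omega
          rw [this]
        · rw [if_neg hmod]
          have hndvd : ¬ d ∣ N := fun hd =>
            hmod ((EuclideanDomain.mod_eq_zero).mpr (by exact_mod_cast hd))
          have hdne : d ≠ N.minFac := fun h => hndvd (h ▸ hqd)
          have hlt : d < N.minFac := by omega
          have hstep : d + 2 ≤ N.minFac := by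
            rw [Nat.odd_iff] at hodd3; omega
          have hcast : (d : Int) + 2 = ((d + 2 : ℕ) : Int) := by push_cast; ring
          rw [hcast]
          apply ih (d + 2) (by rw [Nat.odd_iff] at hodd3 ⊢; omega) (by omega) hstep
          push_cast at hfuel ⊢; omega
      · rw [if_neg hdd]
        have hddn : ¬ d * d ≤ N := fun h => hdd (by exact_mod_cast h)
        have hqN : N.minFac = N := by
          by_contra hne
          have hqle : N.minFac ≤ N := Nat.minFac_le (by omega)
          have hlt : N.minFac < N := by omega
          obtain ⟨t, ht⟩ := hqd
          have ht1 : 1 < t := by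
            rcases t with _ | _ | t
            · simp at ht; omega
            · simp at ht; omega
            · omega
          have htd : t ∣ N := by rw [ht]; exact dvd_mul_left t N.minFac
          have hqt : N.minFac ≤ t := Nat.minFac_le_of_dvd (by omega) htd
          apply hddn
          nlinarith
        rw [hqN]

theorem new_helper_eq (k : Int) (hk : k ≠ 0) :
    new_helper k = ((4 * k * k + 1).toNat.minFac : Int) := by
  obtain ⟨hN5, hNodd, hNcast⟩ := pvN_facts k hk
  obtain ⟨hq, hqodd, hq3, hqN, hqd⟩ := pvQ_facts _ hN5 hNodd
  have h := pvAMain_spec k hk ((4 * k * k + 1).toNat + 1) 1 3 (by norm_num)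
    (by norm_num) hq3 (by push_cast; omega)
  have e1 : (((1 : ℕ) : Int)) ^ 2 + k ^ 2 = 1 + k ^ 2 := by push_cast; ring
  have e3 : (((3 : ℕ) : Int)) = 3 := by norm_num
  rw [e1, e3] at h
  exact h

theorem new_helper_alt_eq (k : Int) (hk : k ≠ 0) :
    new_helper_alt k = ((4 * k * k + 1).toNat.minFac : Int) := by
  obtain ⟨hN5, hNodd, hNcast⟩ := pvN_facts k hk
  obtain ⟨hq, hqodd, hq3, hqN, hqd⟩ := pvQ_facts _ hN5 hNodd
  have h := pvBLoop_spec (4 * k * k + 1).toNat hN5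
    (by intro hd; obtain ⟨c, hc⟩ := hd; omega) ((4 * k * k + 1).toNat + 1) 3
    ⟨1, by norm_num⟩ (by norm_num) hq3 (by push_cast; omega)
  have e3 : (((3 : ℕ) : Int)) = 3 := by norm_num
  rw [e3, hNcast] at h
  exact h

-- ===== VERDICT (by name: the statement is the Claim_ definition above) =====
theorem new_helper_spec : Claim_equal_new_helper := by
  intro k _ hk
  unfold Spec_new_helper
  rw [new_helper_eq k hk, new_helper_alt_eq k hk]
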